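-- pv_equiv track=rewrite | github.com/Nishan45/Rubik-s-Cube-Solver | cube_solver.py | get_cube_pattern
-- ===== SOURCE A (Python) =====
-- def get_cube_pattern(sol):
--   # this retunrs the sol in the form of list
--     patterns=[]
--     for i in range(len(sol)):
--         if sol[i]!=' ' and sol[i]!='2' and sol[i]!='3' and sol[i]!="'":
--             t=sol[i]
--             if ((i+1)<len(sol)) and (sol[i+1]=='2' or sol[i+1]=='3' or sol[i+1]=="'"):
--                 t+=sol[i+1]
--                 i+=1
--             patterns.append(t)
--     return patterns
-- ===== SOURCE B (Python) =====
-- import re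
--
-- def get_cube_pattern(sol):
--     # regex tokenizer: any non-modifier char, optionally glued to one following modifier
--     return re.findall(r"[^ 23']['23]?", sol)
-- ===== Notes on version B (the rewrite author's own statement) =====
-- stated objective: idiomatic
-- what changed: Replaces the manual index loop with single-char lookahead by one regex findall that matches a non-modifier character optionally followed by one modifier.
import Mathlib
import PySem

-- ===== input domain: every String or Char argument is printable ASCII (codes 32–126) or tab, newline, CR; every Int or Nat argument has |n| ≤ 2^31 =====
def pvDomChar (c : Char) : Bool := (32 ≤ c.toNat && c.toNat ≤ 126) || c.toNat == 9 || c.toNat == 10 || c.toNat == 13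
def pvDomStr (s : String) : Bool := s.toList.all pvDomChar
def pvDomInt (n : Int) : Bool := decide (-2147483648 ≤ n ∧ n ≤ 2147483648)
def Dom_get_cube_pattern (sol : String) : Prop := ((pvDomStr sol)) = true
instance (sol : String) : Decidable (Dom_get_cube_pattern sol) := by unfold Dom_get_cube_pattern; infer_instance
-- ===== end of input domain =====

-- B tokenizes with one regex findall instead of A's index loop with lookahead; same output, same cost (objective: idiomatic).

-- ===== PORT A =====
-- body of A's loop for index i: append sol[i] (glued to a following modifier) unless sol[i] is a modifier/space
def pvTokA (cs : List Char) (i : Nat) : List String :=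
  match cs[i]? with
  | some c =>
    if c ≠ ' ' ∧ c ≠ '2' ∧ c ≠ '3' ∧ c ≠ '\'' then
      [match cs[i+1]? with
       | some n => if n = '2' ∨ n = '3' ∨ n = '\'' then String.ofList [c, n] else String.ofList [c]
       | none => String.ofList [c]]
    else []
  | none => []

def get_cube_pattern (sol : String) : List String :=
  (List.range sol.toList.length).foldl (fun patterns i => patterns ++ pvTokA sol.toList i) []

-- ===== PORT B =====
-- hand port of re.findall(r"[^ 23']['23]?", sol): the matcher scans left to right, a match starts at a
-- non-modifier char and greedily consumes one following modifier; unmatched chars are skipped. Exact for this regex.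
def pvScanB : List Char → List String
  | [] => []
  | c :: rest =>
    if c = ' ' ∨ c = '2' ∨ c = '3' ∨ c = '\'' then pvScanB rest
    else
      match rest with
      | n :: rest' =>
        if n = '2' ∨ n = '3' ∨ n = '\'' then String.ofList [c, n] :: pvScanB rest'
        else String.ofList [c] :: pvScanB (n :: rest')
      | [] => [String.ofList [c]]



def get_cube_pattern_alt (sol : String) : List String := pvScanB sol.toList

-- ===== PRECONDITION & SPEC =====
def Spec_get_cube_pattern (sol : String) (out : List String) : Prop := out = get_cube_pattern_alt sol
instance (sol : String) (out : List String) : Decidable (Spec_get_cube_pattern sol out) := by unfold Spec_get_cube_pattern; infer_instance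

-- ===== CLAIM (what is proved, stated in full; the proofs are below) =====
def Claim_equal_get_cube_pattern : Prop := ∀ (sol : String), Dom_get_cube_pattern sol → Spec_get_cube_pattern sol (get_cube_pattern sol)

-- ===== LEMMAS AND PROOFS =====

lemma pvTokA_shift (c : Char) (rest : List Char) (i : Nat) :
    pvTokA (c :: rest) (i + 1) = pvTokA rest i := by
  simp [pvTokA]

lemma pvRange_flatMap_cons (c : Char) (rest : List Char) :
    (List.range (c :: rest).length).flatMap (pvTokA (c :: rest))
      = pvTokA (c :: rest) 0 ++ (List.range rest.length).flatMap (pvTokA rest) := by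
  simp [List.length_cons, List.range_succ_eq_map, List.flatMap_cons, List.flatMap_map, pvTokA_shift]

lemma pvFlatMap_eq_scan (cs : List Char) :
    (List.range cs.length).flatMap (pvTokA cs) = pvScanB cs := by
  induction cs using pvScanB.induct with
  | case1 => simp [pvScanB]
  | case2 c rest hmod ih =>
    rw [pvRange_flatMap_cons, ih]
    rcases hmod with h | h | h | h <;> subst h <;> (conv_rhs => rw [pvScanB.eq_def]) <;> simp [pvTokA]
  | case3 c hmod n rest' hn ih =>
    rw [pvRange_flatMap_cons, pvRange_flatMap_cons, ih]
    obtain ⟨h1, h2, h3, h4⟩ : c ≠ ' ' ∧ c ≠ '2' ∧ c ≠ '3' ∧ c ≠ '\'' := by tauto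
    rcases hn with h | h | h <;> subst h <;> simp [pvTokA, pvScanB, h1, h2, h3, h4]
  | case4 c hmod n rest' hn ih =>
    rw [pvRange_flatMap_cons, ih]
    obtain ⟨h1, h2, h3, h4⟩ : c ≠ ' ' ∧ c ≠ '2' ∧ c ≠ '3' ∧ c ≠ '\'' := by tauto
    obtain ⟨g1, g2, g3⟩ : n ≠ '2' ∧ n ≠ '3' ∧ n ≠ '\'' := by tauto
    simp [pvTokA, pvScanB, h1, h2, h3, h4, g1, g2, g3]
  | case5 c hmod =>
    obtain ⟨h1, h2, h3, h4⟩ : c ≠ ' ' ∧ c ≠ '2' ∧ c ≠ '3' ∧ c ≠ '\'' := by tauto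
    simp [pvTokA, pvScanB, h1, h2, h3, h4]

-- ===== VERDICT (by name: the statement is the Claim_ definition above) =====
theorem get_cube_pattern_spec : Claim_equal_get_cube_pattern := by
  intro sol _
  unfold Spec_get_cube_pattern get_cube_pattern get_cube_pattern_alt
  rw [PySem.List.foldl_append_eq_flatMap, List.nil_append, pvFlatMap_eq_scan]
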